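-- pv_equiv track=rewrite | github.com/AntoniaJJJJ/Speech-Attribute-Transcription | evaluation_metrics.py | convert_to_binary_matrix
-- ===== SOURCE A (Python) =====
-- def convert_to_binary_matrix(data, unique_classes):
--     """
--     Convert the multilabel sequences into a binary matrix for metric calculations.
--     Each unique class becomes a column, and each row represents the labels for a phoneme.
--     """
--     class_to_index = {label: idx for idx, label in enumerate(unique_classes)}
--     binary_matrix = []
--     for sequence in data:
--         for phoneme_labels in sequence:
--             # Split space-separated attributes in each string
--             attributes = phoneme_labels.split()
--             row = [0] * len(unique_classes)
--             for label in attributes: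
--                 if label not in class_to_index:
--                     raise ValueError(f"Unexpected label '{label}' in data.")
--                 row[class_to_index[label]] = 1
--             binary_matrix.append(row)
--     return binary_matrix, class_to_index
-- ===== SOURCE B (Python) =====
-- def convert_to_binary_matrix(data, unique_classes):
--     """
--     Gather formulation: per phoneme, collect the set of column indices of its
--     attributes (validating each label), then generate the row by iterating the
--     column positions and testing membership, instead of scattering 1s into a
--     zero row.
--     """
--     class_to_index = {label: idx for idx, label in enumerate(unique_classes)}
--     n = len(unique_classes)
--
--     def row_of(phoneme_labels):
--         cols = set()
--         for label in phoneme_labels.split():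
--             if label not in class_to_index:
--                 raise ValueError(f"Unexpected label '{label}' in data.")
--             cols.add(class_to_index[label])
--         return [1 if j in cols else 0 for j in range(n)]
--
--     binary_matrix = [row_of(p) for sequence in data for p in sequence]
--     return binary_matrix, class_to_index
-- ===== Notes on version B (the rewrite author's own statement) =====
-- stated objective: alternative
-- what changed: The row is built by 'gather' (collect the set of column indices per phoneme, then generate the row by membership over the column positions, with the matrix produced as a flat comprehension) instead of A's 'scatter' (allocate a zero row and write 1s into it inside nested loops).
import Mathlib
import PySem

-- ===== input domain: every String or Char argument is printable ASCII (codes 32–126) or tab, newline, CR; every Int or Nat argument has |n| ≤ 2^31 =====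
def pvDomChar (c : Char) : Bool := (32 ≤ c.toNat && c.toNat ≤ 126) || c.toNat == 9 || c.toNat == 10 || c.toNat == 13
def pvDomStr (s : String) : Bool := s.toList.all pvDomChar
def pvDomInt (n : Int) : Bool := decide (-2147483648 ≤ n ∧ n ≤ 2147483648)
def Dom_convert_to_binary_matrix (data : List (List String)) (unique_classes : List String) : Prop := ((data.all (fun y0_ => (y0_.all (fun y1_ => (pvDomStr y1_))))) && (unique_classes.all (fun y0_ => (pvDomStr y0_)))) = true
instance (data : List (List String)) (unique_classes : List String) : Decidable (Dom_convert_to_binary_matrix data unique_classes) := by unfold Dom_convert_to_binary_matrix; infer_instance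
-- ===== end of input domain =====

-- B builds each row by 'gather' (a set of column indices, then membership over the
-- column positions, the matrix as one flat comprehension) instead of A's 'scatter'
-- into a zero row inside nested loops; same cost, a different algorithm (objective: alternative).

-- ===== PORT A =====
-- class_to_index = {label: idx for idx, label in enumerate(unique_classes)}  (shared by both Pythons, line for line)
def pvCti (unique_classes : List String) : PySem.Dict String Int :=
  (PySem.List.enumerate unique_classes 0).foldl (fun d p => d.insert p.2 p.1) PySem.Dict.empty

def convert_to_binary_matrix (data : List (List String)) (unique_classes : List String) : List (List Int) × (List (String × Int)) :=
  let class_to_index := pvCti unique_classes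
  let binary_matrix :=
    data.foldl (fun bm sequence =>
      sequence.foldl (fun bm phoneme_labels =>
        let attributes := PySem.Str.split₀ phoneme_labels
        let row : List Int := List.replicate unique_classes.length 0
        let row := attributes.foldl (fun row label =>
          match class_to_index.get? label with
          | none => row            -- Python raises ValueError here; excluded by Pre_
          | some idx => PySem.List.pySetD row idx 1) row
        bm ++ [row]) bm) []
  (binary_matrix, class_to_index.items)

-- ===== PORT B =====
def pvRowOf (class_to_index : PySem.Dict String Int) (n : Nat) (phoneme_labels : String) : List Int :=
  let cols : PySem.Set Int :=
    (PySem.Str.split₀ phoneme_labels).foldl (fun cols label =>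
      match class_to_index.get? label with
      | none => cols               -- Python raises ValueError here; excluded by Pre_
      | some idx => PySem.Set.add cols idx) PySem.Set.empty
  (PySem.List.pyRange 0 (n : Int) 1).map (fun j => if PySem.Set.contains cols j then (1 : Int) else 0)

def convert_to_binary_matrix_alt (data : List (List String)) (unique_classes : List String) : List (List Int) × (List (String × Int)) :=
  let class_to_index := pvCti unique_classes
  let n := unique_classes.length
  let binary_matrix := data.flatMap (fun sequence => sequence.map (pvRowOf class_to_index n))
  (binary_matrix, class_to_index.items)

-- ===== PRECONDITION & SPEC =====
-- Pre_ excludes exactly the inputs where A raises ValueError: some whitespace-split token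
-- of some phoneme string is not one of the unique classes.
def Pre_convert_to_binary_matrix (data : List (List String)) (unique_classes : List String) : Prop :=
  ∀ sequence ∈ data, ∀ p ∈ sequence, ∀ l ∈ PySem.Str.split₀ p, l ∈ unique_classes
instance (data : List (List String)) (unique_classes : List String) : Decidable (Pre_convert_to_binary_matrix data unique_classes) := by unfold Pre_convert_to_binary_matrix; infer_instance
def pvWitness_convert_to_binary_matrix : List (List String) × List String := ([["a b", "b"], ["c"]], ["a", "b", "c"])

def Spec_convert_to_binary_matrix (data : List (List String)) (unique_classes : List String) (out : List (List Int) × (List (String × Int))) : Prop := out = convert_to_binary_matrix_alt data unique_classes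
instance (data : List (List String)) (unique_classes : List String) (out : List (List Int) × (List (String × Int))) : Decidable (Spec_convert_to_binary_matrix data unique_classes out) := by unfold Spec_convert_to_binary_matrix; infer_instance

-- ===== CLAIM (what is proved, stated in full; the proofs are below) =====
def Claim_equal_convert_to_binary_matrix : Prop := ∀ (data : List (List String)) (unique_classes : List String), Dom_convert_to_binary_matrix data unique_classes → Pre_convert_to_binary_matrix data unique_classes → Spec_convert_to_binary_matrix data unique_classes (convert_to_binary_matrix data unique_classes)

-- ===== LEMMAS AND PROOFS =====

-- Every value stored by the dict-comprehension fold is a valid column index.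
lemma pvCti_fold_bound (u : List String) (s : Int) (d : PySem.Dict String Int)
    (hs : 0 ≤ s)
    (hd : ∀ l v, d.get? l = some v → 0 ≤ v ∧ v < s) :
    ∀ l v, ((PySem.List.enumerate u s).foldl (fun d p => d.insert p.2 p.1) d).get? l = some v →
      0 ≤ v ∧ v < s + u.length := by
  induction u generalizing s d with
  | nil =>
    intro l v h
    simp [PySem.List.enumerate] at h
    have := hd l v h
    simpa using ⟨this.1, by omega⟩
  | cons x xs ih =>
    intro l v h
    rw [PySem.List.enumerate_cons] at h
    simp only [List.foldl_cons] at h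
    have h' := ih (s + 1) (d.insert x s) (by omega) ?_ l v h
    · constructor
      · exact h'.1
      · have := h'.2; simp only [List.length_cons] at *; omega
    · intro l' v' hv
      rw [PySem.Dict.get?_insert] at hv
      split at hv
      · cases hv; omega
      · have := hd l' v' hv; omega

lemma pvCti_bound (u : List String) :
    ∀ l v, (pvCti u).get? l = some v → 0 ≤ v ∧ v < (u.length : Int) := by
  intro l v h
  have := pvCti_fold_bound u 0 PySem.Dict.empty (le_refl 0)
    (by intro l v h; simp [PySem.Dict.get?_empty] at h) l v h
  simpa using this

-- Setting position idx of a gather row to 1 is gathering over the enlarged set.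
lemma pvSet_gather_row (cols : PySem.Set Int) (n : Nat) (idx : Int)
    (h0 : 0 ≤ idx) (_hn : idx < (n : Int)) :
    PySem.List.pySetD ((PySem.List.pyRange 0 (n : Int) 1).map
        (fun j => if PySem.Set.contains cols j then (1 : Int) else 0)) idx 1 =
      (PySem.List.pyRange 0 (n : Int) 1).map
        (fun j => if PySem.Set.contains (PySem.Set.add cols idx) j then (1 : Int) else 0) := by
  rw [PySem.List.pySetD_of_nonneg _ _ h0]
  apply List.ext_getElem
  · simp
  · intro k h1 h2
    rw [List.getElem_set]
    simp only [List.getElem_map, PySem.List.getElem_pyRange_one, zero_add]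
    by_cases hki : idx.toNat = k
    · have hkid : (k : Int) = idx := by omega
      rw [if_pos hki, hkid]
      have hm : idx ∈ PySem.Set.add cols idx := (PySem.Set.mem_add cols idx idx).2 (Or.inr rfl)
      rw [if_pos ((PySem.Set.contains_iff _ _).2 hm)]
    · have hne : (k : Int) ≠ idx := by omega
      rw [if_neg hki]
      have hiff : PySem.Set.contains (PySem.Set.add cols idx) (k : Int) = PySem.Set.contains cols (k : Int) := by
        by_cases hm : (k : Int) ∈ cols
        · rw [(PySem.Set.contains_iff _ _).2 hm,
            (PySem.Set.contains_iff _ _).2 ((PySem.Set.mem_add _ _ _).2 (Or.inl hm))]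
        · have hm' : ¬ (k : Int) ∈ PySem.Set.add cols idx := by
            rw [PySem.Set.mem_add]; rintro (h | h); exacts [hm h, hne h]
          rw [Bool.eq_iff_iff, PySem.Set.contains_iff, PySem.Set.contains_iff]
          tauto
      rw [hiff]

-- One scatter step on a gather row is one set-insertion step (Option.elim form).
lemma pvStep (cti : PySem.Dict String Int) (n : Nat)
    (hb : ∀ l v, cti.get? l = some v → 0 ≤ v ∧ v < (n : Int)) (s : PySem.Set Int) (lab : String) :
    Option.elim (cti.get? lab)
        ((PySem.List.pyRange 0 (n : Int) 1).map
          (fun j => if PySem.Set.contains s j then (1 : Int) else 0))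
        (fun idx => PySem.List.pySetD ((PySem.List.pyRange 0 (n : Int) 1).map
          (fun j => if PySem.Set.contains s j then (1 : Int) else 0)) idx 1) =
      (PySem.List.pyRange 0 (n : Int) 1).map
        (fun j => if PySem.Set.contains
            (Option.elim (cti.get? lab) s (fun idx => PySem.Set.add s idx)) j then (1 : Int) else 0) := by
  cases h : cti.get? lab with
  | none => rfl
  | some idx =>
    simp only [Option.elim]
    exact pvSet_gather_row s n idx (hb lab idx h).1 (hb lab idx h).2

-- A's scatter fold over the attributes equals B's gather row, from any starting set.
lemma pvScatter_eq_gather (cti : PySem.Dict String Int) (n : Nat)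
    (hb : ∀ l v, cti.get? l = some v → 0 ≤ v ∧ v < (n : Int)) (attrs : List String) :
    ∀ cols : PySem.Set Int,
      attrs.foldl (fun row label =>
          match cti.get? label with
          | none => row
          | some idx => PySem.List.pySetD row idx 1)
        ((PySem.List.pyRange 0 (n : Int) 1).map
          (fun j => if PySem.Set.contains cols j then (1 : Int) else 0)) =
      (PySem.List.pyRange 0 (n : Int) 1).map
        (fun j => if PySem.Set.contains
            (attrs.foldl (fun cols label =>
              match cti.get? label with
              | none => cols
              | some idx => PySem.Set.add cols idx) cols) j then (1 : Int) else 0) := by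
  have e1 : (fun (row : List Int) label =>
      match cti.get? label with
      | none => row
      | some idx => PySem.List.pySetD row idx 1)
      = (fun row label => Option.elim (cti.get? label) row (fun idx => PySem.List.pySetD row idx 1)) := by
    funext row label; cases cti.get? label <;> rfl
  have e2 : (fun (cols : PySem.Set Int) label =>
      match cti.get? label with
      | none => cols
      | some idx => PySem.Set.add cols idx)
      = (fun cols label => Option.elim (cti.get? label) cols (fun idx => PySem.Set.add cols idx)) := by
    funext cols label; cases cti.get? label <;> rfl
  rw [e1, e2]
  induction attrs with
  | nil => intro cols; simp
  | cons a rest ih =>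
    intro cols
    simp only [List.foldl_cons]
    rw [pvStep cti n hb cols a]
    exact ih (Option.elim (cti.get? a) cols (fun idx => PySem.Set.add cols idx))

-- The zero row is the gather row of the empty set.
lemma pvZero_row (n : Nat) :
    (List.replicate n 0 : List Int) =
      (PySem.List.pyRange 0 (n : Int) 1).map
        (fun j => if PySem.Set.contains (PySem.Set.empty : PySem.Set Int) j then (1 : Int) else 0) := by
  have : (PySem.List.pyRange 0 (n : Int) 1).map
      (fun j => if PySem.Set.contains (PySem.Set.empty : PySem.Set Int) j then (1 : Int) else 0) =
      (PySem.List.pyRange 0 (n : Int) 1).map (fun _ => (0 : Int)) := by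
    apply List.map_congr_left; intro j _; simp [PySem.Set.empty, PySem.Set.contains]
  rw [this, List.map_const', PySem.List.length_pyRange_one]
  simp

-- Each of A's rows is B's row.
lemma pvRow_eq (u : List String) (p : String) :
    ((PySem.Str.split₀ p).foldl (fun row label =>
        match (pvCti u).get? label with
        | none => row
        | some idx => PySem.List.pySetD row idx 1)
      ((List.replicate u.length 0 : List Int))) = pvRowOf (pvCti u) u.length p := by
  rw [pvZero_row u.length, pvScatter_eq_gather (pvCti u) u.length (pvCti_bound u)]
  rfl

-- ===== VERDICT (by name: the statement is the Claim_ definition above) =====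
theorem convert_to_binary_matrix_spec : Claim_equal_convert_to_binary_matrix := by
  intro data unique_classes _ _
  unfold Spec_convert_to_binary_matrix convert_to_binary_matrix convert_to_binary_matrix_alt
  refine Prod.ext ?_ rfl
  simp only
  have hinner : ∀ (sequence : List String) (bm : List (List Int)),
      sequence.foldl (fun bm phoneme_labels =>
        bm ++ [(PySem.Str.split₀ phoneme_labels).foldl (fun row label =>
          match (pvCti unique_classes).get? label with
          | none => row
          | some idx => PySem.List.pySetD row idx 1)
          ((List.replicate unique_classes.length 0 : List Int))]) bm =
      bm ++ sequence.map (pvRowOf (pvCti unique_classes) unique_classes.length) := by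
    intro sequence bm
    rw [PySem.List.foldl_append_singleton_eq_map
      (fun p => (PySem.Str.split₀ p).foldl (fun row label =>
          match (pvCti unique_classes).get? label with
          | none => row
          | some idx => PySem.List.pySetD row idx 1)
        (List.replicate unique_classes.length 0)) sequence bm]
    congr 1
    exact List.map_congr_left (fun p _ => pvRow_eq unique_classes p)
  calc data.foldl (fun bm sequence =>
          sequence.foldl (fun bm phoneme_labels =>
            bm ++ [(PySem.Str.split₀ phoneme_labels).foldl (fun row label =>
              match (pvCti unique_classes).get? label with
              | none => row
              | some idx => PySem.List.pySetD row idx 1)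
              ((List.replicate unique_classes.length 0 : List Int))]) bm) []
      = data.foldl (fun bm sequence =>
          bm ++ sequence.map (pvRowOf (pvCti unique_classes) unique_classes.length)) [] := by
        exact PySem.List.foldl_congr_mem data _ _ [] (fun bm sequence _ => hinner sequence bm)
    _ = data.flatMap (fun sequence => sequence.map (pvRowOf (pvCti unique_classes) unique_classes.length)) := by
        rw [PySem.List.foldl_append_eq_flatMap]; rfl
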